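-- pv_equiv track=rewrite | github.com/mguerreiro24/Trophic_Ecology | trophic_WEBS.py | DOM_MATRIX
-- ===== SOURCE A (Python) =====
-- def DOM_MATRIX(matrix_root):
--     """receives rooted matrix and provides dominator matrix"""
--     #create matrix full of 1 except first line with 0
--     N = len(matrix_root)
--     DM = [[1 for j in range(N)] for i in range(N)]
--     for i in range(1,N):
--         DM[0][i] = 0
--     ##
--     flag = True
--     while flag:
--         flag = False
--         for i in range(1,N):
--             tmp = [1]*N
--             for j in range(N):
--                 if matrix_root[j][i]>0:
--                     tmp = [item_one*item_two for item_one, item_two in zip(tmp, DM[j])]#tmp *= DM[j]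
--             tmp[i] = 1
--             if sum(list(map(abs,[item_one-item_two for item_one, item_two in zip(tmp, DM[i])])))!=0:
--                 flag = True
--             DM[i] = tmp
--     return DM
-- ===== SOURCE B (Python) =====
-- def _reach_avoiding(matrix_root, N, k):
--     """Boolean array: nodes reachable from node 0 along edges j->i (matrix_root[j][i] > 0)
--     on paths whose every node (including node 0 itself) differs from k."""
--     seen = [False] * N
--     if k == 0:
--         return seen
--     seen[0] = True
--     for _ in range(N):
--         changed = False
--         for j in range(N):
--             if seen[j]:
--                 row = matrix_root[j]
--                 for i in range(N):
--                     if row[i] > 0 and i != k and not seen[i]: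
--                         seen[i] = True
--                         changed = True
--         if not changed:
--             break
--     return seen
--
--
-- def DOM_MATRIX(matrix_root):
--     """receives rooted matrix and provides dominator matrix"""
--     N = len(matrix_root)
--     reach = [_reach_avoiding(matrix_root, N, k) for k in range(N)]
--     return [[1 if (i == k or not reach[k][i]) else 0 for k in range(N)]
--             for i in range(N)]
-- ===== Notes on version B (the rewrite author's own statement) =====
-- stated objective: alternative
-- what changed: Replaces the global product-dataflow fixpoint sweep over the whole dominator matrix with N independent avoid-k reachability searches (i is dominated by k iff i = k or i is unreachable from the root once node k is removed).
import Mathlib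
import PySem

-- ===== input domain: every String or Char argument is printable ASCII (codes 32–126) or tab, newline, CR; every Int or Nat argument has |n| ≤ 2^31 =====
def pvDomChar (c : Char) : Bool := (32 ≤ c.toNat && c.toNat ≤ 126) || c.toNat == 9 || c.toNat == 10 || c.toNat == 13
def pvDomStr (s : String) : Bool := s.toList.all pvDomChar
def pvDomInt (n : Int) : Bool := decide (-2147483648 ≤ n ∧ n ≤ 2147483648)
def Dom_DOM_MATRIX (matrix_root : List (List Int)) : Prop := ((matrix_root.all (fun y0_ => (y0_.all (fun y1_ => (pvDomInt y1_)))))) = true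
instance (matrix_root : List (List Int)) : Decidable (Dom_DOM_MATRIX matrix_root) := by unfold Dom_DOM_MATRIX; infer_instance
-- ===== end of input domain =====

-- B replaces A's whole-matrix dataflow fixpoint by per-node avoid-k reachability searches
-- (a genuinely different algorithm of comparable cost; equal return value on all admitted inputs).

-- ===== PORT A =====
-- [[1 for j in range(N)] for i in range(N)]
def pvOnesRow (N : Nat) : List Int := (List.range N).map (fun _ => (1:Int))

-- tmp = [1]*N; for j in range(N): if matrix_root[j][i]>0: tmp = [x*y for x,y in zip(tmp, DM[j])]; tmp[i] = 1
def pvUpdRow (mr : List (List Int)) (N : Nat) (D : List (List Int)) (i : Nat) : List Int :=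
  (((List.range N).foldl (fun t j =>
      if 0 < ((mr.getD j []).getD i 0) then
        ((t.zip (D.getD j [])).map (fun p => p.1 * p.2))
      else t) (pvOnesRow N))).set i 1

-- body of "for i in range(1,N)": compare tmp with DM[i] (sum of abs of differences), set flag, DM[i] = tmp
def pvSweepStep (mr : List (List Int)) (N : Nat) (s : List (List Int) × Bool) (i : Nat) :
    List (List Int) × Bool :=
  let tmp := pvUpdRow mr N s.1 i
  let flag := if ((((tmp.zip (s.1.getD i [])).map (fun p => p.1 - p.2)).map (fun x => |x|)).sum ≠ 0)
              then true else s.2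
  (s.1.set i tmp, flag)

-- one pass of the while-body: "flag = False; for i in range(1,N): ..."
def pvSweep (mr : List (List Int)) (N : Nat) (D : List (List Int)) : List (List Int) × Bool :=
  (List.range' 1 (N - 1)).foldl (pvSweepStep mr N) (D, false)

-- "while flag:" — fuel N*N+2 is provably enough (each continuing sweep strictly lowers the 1-count)
def pvLoopA (mr : List (List Int)) (N : Nat) : Nat → List (List Int) → List (List Int)
  | 0, D => D
  | f+1, D =>
    let r := pvSweep mr N D
    if r.2 then pvLoopA mr N f r.1 else r.1

def DOM_MATRIX (matrix_root : List (List Int)) : List (List Int) :=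
  let N := matrix_root.length
  let DM0 := (List.range N).map (fun _ => (List.range N).map (fun _ => (1:Int)))
  -- for i in range(1,N): DM[0][i] = 0
  let DM1 := (List.range' 1 (N - 1)).foldl (fun D i => D.set 0 ((D.getD 0 []).set i 0)) DM0
  pvLoopA matrix_root N (N*N+2) DM1

-- ===== PORT B =====
-- if row[i] > 0 and i != k and not seen[i]: seen[i] = True; changed = True
def pvRInner (row : List Int) (k : Nat) (s : List Bool × Bool) (i : Nat) : List Bool × Bool :=
  if 0 < row.getD i 0 ∧ i ≠ k ∧ s.1.getD i false = false then (s.1.set i true, true) else s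

-- if seen[j]: row = matrix_root[j]; for i in range(N): ...
def pvROuter (mr : List (List Int)) (N k : Nat) (s : List Bool × Bool) (j : Nat) :
    List Bool × Bool :=
  if s.1.getD j false then (List.range N).foldl (pvRInner (mr.getD j []) k) s else s

-- one round of the "for _ in range(N)" loop body, returning (seen, changed)
def pvReachRound (mr : List (List Int)) (N k : Nat) (seen : List Bool) : List Bool × Bool :=
  (List.range N).foldl (pvROuter mr N k) (seen, false)

-- for _ in range(N): ... ; if not changed: break
def pvReachLoop (mr : List (List Int)) (N k : Nat) : Nat → List Bool → List Bool
  | 0, seen => seen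
  | f+1, seen =>
    let r := pvReachRound mr N k seen
    if r.2 then pvReachLoop mr N k f r.1 else r.1

def pvReachAvoiding (mr : List (List Int)) (N k : Nat) : List Bool :=
  let seen := (List.range N).map (fun _ => false)
  if k = 0 then seen else pvReachLoop mr N k N (seen.set 0 true)

def DOM_MATRIX_alt (matrix_root : List (List Int)) : List (List Int) :=
  let N := matrix_root.length
  let reach := (List.range N).map (fun k => pvReachAvoiding matrix_root N k)
  (List.range N).map (fun i => (List.range N).map (fun k =>
    if i = k ∨ (reach.getD k []).getD i false = false then (1:Int) else 0))

-- ===== PRECONDITION & SPEC =====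
-- Pre_ excludes exactly the inputs where Python A raises IndexError: N ≥ 2 with some row
-- shorter than N (A reads matrix_root[j][i] for every j < N, 1 ≤ i < N).
def Pre_DOM_MATRIX (matrix_root : List (List Int)) : Prop :=
  matrix_root.length ≤ 1 ∨ ∀ row ∈ matrix_root, matrix_root.length ≤ row.length
instance (matrix_root : List (List Int)) : Decidable (Pre_DOM_MATRIX matrix_root) := by
  unfold Pre_DOM_MATRIX; infer_instance

def pvWitness_DOM_MATRIX : List (List Int) := [[0, 1], [0, 0]]

def Spec_DOM_MATRIX (matrix_root : List (List Int)) (out : List (List Int)) : Prop :=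
  out = DOM_MATRIX_alt matrix_root
instance (matrix_root : List (List Int)) (out : List (List Int)) :
    Decidable (Spec_DOM_MATRIX matrix_root out) := by unfold Spec_DOM_MATRIX; infer_instance

-- ===== CLAIM (what is proved, stated in full; the proofs are below) =====
def Claim_equal_DOM_MATRIX : Prop := ∀ (matrix_root : List (List Int)),
  Dom_DOM_MATRIX matrix_root → Pre_DOM_MATRIX matrix_root →
  Spec_DOM_MATRIX matrix_root (DOM_MATRIX matrix_root)

-- ===== LEMMAS AND PROOFS =====

-- ===== B-side development =====
def pvVal (D : List (List Int)) (i k : Nat) : Int := (D.getD i []).getD k 0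

inductive PvReach (mr : List (List Int)) (k : Nat) : Nat → Prop
  | zero : k ≠ 0 → 0 < mr.length → PvReach mr k 0
  | step {j i : Nat} : PvReach mr k j → 0 < ((mr.getD j []).getD i 0) → i < mr.length → i ≠ k →
      PvReach mr k i

theorem pvReach_lt {mr : List (List Int)} {k i : Nat} (h : PvReach mr k i) : i < mr.length := by
  cases h with
  | zero _ h2 => exact h2
  | step _ _ h3 _ => exact h3

theorem pvReach_kne {mr : List (List Int)} {k i : Nat} (h : PvReach mr k i) : k ≠ 0 := by
  induction h with
  | zero h1 _ => exact h1
  | step _ _ _ _ ih => exact ih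

theorem pvNoReach0 {mr : List (List Int)} {i : Nat} (h : PvReach mr 0 i) : False :=
  pvReach_kne h rfl

-- getD/set basics on Bool lists
theorem pvGetD_set {α : Type} {l : List α} {i q : Nat} {b d : α} :
    (l.set i b).getD q d = if q = i ∧ i < l.length then b else l.getD q d := by
  simp only [List.getD_eq_getElem?_getD, List.getElem?_set]
  split_ifs <;> simp_all

def pvCount (l : List Bool) : Nat := l.countP id

theorem pvCount_le_len (l : List Bool) : pvCount l ≤ l.length := List.countP_le_length

theorem pvCount_cons (a : Bool) (t : List Bool) :
    pvCount (a :: t) = pvCount t + (if a then 1 else 0) := by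
  simp [pvCount, List.countP_cons]

theorem pvCount_set_true {l : List Bool} {i : Nat} (h : i < l.length)
    (h0 : l.getD i false = false) : pvCount (l.set i true) = pvCount l + 1 := by
  induction l generalizing i with
  | nil => simp at h
  | cons a t ih =>
    cases i with
    | zero =>
      simp only [List.getD_eq_getElem?_getD] at h0
      simp at h0
      simp [List.set, pvCount_cons, h0]
    | succ n =>
      simp only [List.length_cons] at h
      have := ih (i := n) (by omega) (by simpa using h0)
      simp [List.set, pvCount_cons]
      omega

-- fold invariants for the reachability round
theorem pvRInner_len (row : List Int) (k : Nat) (s : List Bool × Bool) (i : Nat) :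
    ((pvRInner row k s i).1).length = s.1.length := by
  unfold pvRInner; split_ifs <;> simp

theorem pvFoldInner_len (row : List Int) (k : Nat) (l : List Nat) (s : List Bool × Bool) :
    ((l.foldl (pvRInner row k) s).1).length = s.1.length := by
  induction l generalizing s with
  | nil => rfl
  | cons x t ih => simp only [List.foldl_cons]; rw [ih, pvRInner_len]

theorem pvRInner_mono {row : List Int} {k : Nat} {s : List Bool × Bool} {i q : Nat}
    (h : s.1.getD q false = true) : ((pvRInner row k s i).1).getD q false = true := by
  unfold pvRInner; split_ifs with hc
  · simp only; rw [pvGetD_set]; split_ifs <;> simp_all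
  · exact h

theorem pvFoldInner_mono {row : List Int} {k : Nat} {l : List Nat} {s : List Bool × Bool} {q : Nat}
    (h : s.1.getD q false = true) : ((l.foldl (pvRInner row k) s).1).getD q false = true := by
  induction l generalizing s with
  | nil => exact h
  | cons x t ih => exact ih (pvRInner_mono h)

theorem pvROuter_len (mr : List (List Int)) (N k : Nat) (s : List Bool × Bool) (j : Nat) :
    ((pvROuter mr N k s j).1).length = s.1.length := by
  unfold pvROuter; split_ifs
  · rw [pvFoldInner_len]
  · rfl

theorem pvFoldOuter_len (mr : List (List Int)) (N k : Nat) (l : List Nat) (s : List Bool × Bool) :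
    ((l.foldl (pvROuter mr N k) s).1).length = s.1.length := by
  induction l generalizing s with
  | nil => rfl
  | cons x t ih => simp only [List.foldl_cons]; rw [ih, pvROuter_len]

theorem pvROuter_mono {mr : List (List Int)} {N k : Nat} {s : List Bool × Bool} {j q : Nat}
    (h : s.1.getD q false = true) : ((pvROuter mr N k s j).1).getD q false = true := by
  unfold pvROuter; split_ifs
  · exact pvFoldInner_mono h
  · exact h

theorem pvFoldOuter_mono {mr : List (List Int)} {N k : Nat} {l : List Nat} {s : List Bool × Bool}
    {q : Nat} (h : s.1.getD q false = true) :
    ((l.foldl (pvROuter mr N k) s).1).getD q false = true := by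
  induction l generalizing s with
  | nil => exact h
  | cons x t ih => exact ih (pvROuter_mono h)

-- soundness: every true entry is reachable
def pvSound (mr : List (List Int)) (k : Nat) (l : List Bool) : Prop :=
  ∀ i, l.getD i false = true → PvReach mr k i

theorem pvRInner_sound {mr : List (List Int)} {k j i : Nat} {s : List Bool × Bool}
    (hj : PvReach mr k j) (hi : i < mr.length) (hs : pvSound mr k s.1) :
    pvSound mr k ((pvRInner (mr.getD j []) k s i).1) := by
  unfold pvRInner; split_ifs with hc
  · intro q hq
    rw [pvGetD_set] at hq
    split_ifs at hq with hqi
    · exact hqi.1 ▸ PvReach.step hj hc.1 hi hc.2.1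
    · exact hs q hq
  · exact hs

theorem pvFoldInner_sound {mr : List (List Int)} {k j : Nat} {l : List Nat} {s : List Bool × Bool}
    (hj : PvReach mr k j) (hl : ∀ i ∈ l, i < mr.length) (hs : pvSound mr k s.1) :
    pvSound mr k ((l.foldl (pvRInner (mr.getD j []) k) s).1) := by
  induction l generalizing s with
  | nil => exact hs
  | cons x t ih =>
    exact ih (fun i hi => hl i (List.mem_cons_of_mem _ hi))
      (pvRInner_sound hj (hl x (List.mem_cons_self)) hs)

theorem pvROuter_sound {mr : List (List Int)} {k : Nat} {s : List Bool × Bool} {j : Nat}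
    (hl : ∀ i ∈ List.range mr.length, i < mr.length) (hs : pvSound mr k s.1) :
    pvSound mr k ((pvROuter mr mr.length k s j).1) := by
  unfold pvROuter; split_ifs with hg
  · exact pvFoldInner_sound (hs j hg) hl hs
  · exact hs

theorem pvRound_sound {mr : List (List Int)} {k : Nat} {seen : List Bool}
    (hs : pvSound mr k seen) : pvSound mr k ((pvReachRound mr mr.length k seen).1) := by
  unfold pvReachRound
  have : ∀ (l : List Nat) (s : List Bool × Bool), pvSound mr k s.1 →
      pvSound mr k ((l.foldl (pvROuter mr mr.length k) s).1) := by
    intro l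
    induction l with
    | nil => exact fun s h => h
    | cons x t ih =>
      intro s h
      exact ih _ (pvROuter_sound (fun i hi => List.mem_range.mp hi) h)
  exact this _ (seen, false) hs

-- progress: the changed flag is accurate
def pvProg (seen0 : List Bool) (s : List Bool × Bool) : Prop :=
  s.1.length = seen0.length ∧
    ((s.2 = false ∧ s.1 = seen0) ∨ (s.2 = true ∧ pvCount seen0 < pvCount s.1))

theorem pvRInner_prog {row : List Int} {k : Nat} {seen0 : List Bool} {s : List Bool × Bool}
    {i : Nat} (hi : i < seen0.length) (hp : pvProg seen0 s) :
    pvProg seen0 (pvRInner row k s i) := by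
  obtain ⟨hlen, hcase⟩ := hp
  unfold pvRInner; split_ifs with hc
  · refine ⟨by simp [hlen], Or.inr ⟨rfl, ?_⟩⟩
    have hcnt := pvCount_set_true (l := s.1) (i := i) (by omega) hc.2.2
    show pvCount seen0 < pvCount (s.1.set i true)
    rcases hcase with ⟨_, he⟩ | ⟨_, hlt⟩
    · rw [he] at hcnt ⊢; omega
    · omega
  · exact ⟨hlen, hcase⟩

theorem pvFoldInner_prog {row : List Int} {k : Nat} {seen0 : List Bool} {l : List Nat}
    {s : List Bool × Bool} (hl : ∀ i ∈ l, i < seen0.length) (hp : pvProg seen0 s) :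
    pvProg seen0 (l.foldl (pvRInner row k) s) := by
  induction l generalizing s with
  | nil => exact hp
  | cons x t ih =>
    exact ih (fun i hi => hl i (List.mem_cons_of_mem _ hi))
      (pvRInner_prog (hl x List.mem_cons_self) hp)

theorem pvROuter_prog {mr : List (List Int)} {N k : Nat} {seen0 : List Bool}
    {s : List Bool × Bool} {j : Nat} (hN : N ≤ seen0.length) (hp : pvProg seen0 s) :
    pvProg seen0 (pvROuter mr N k s j) := by
  unfold pvROuter; split_ifs
  · exact pvFoldInner_prog (fun i hi => lt_of_lt_of_le (List.mem_range.mp hi) hN) hp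
  · exact hp

theorem pvRound_prog {mr : List (List Int)} {N k : Nat} {seen : List Bool}
    (hN : N ≤ seen.length) : pvProg seen (pvReachRound mr N k seen) := by
  unfold pvReachRound
  have : ∀ (l : List Nat) (s : List Bool × Bool), pvProg seen s →
      pvProg seen (l.foldl (pvROuter mr N k) s) := by
    intro l
    induction l with
    | nil => exact fun s h => h
    | cons x t ih => exact fun s h => ih _ (pvROuter_prog hN h)
  exact this _ (seen, false) ⟨rfl, Or.inl ⟨rfl, rfl⟩⟩

-- a single round closes over any originally-seen node
theorem pvFoldInner_hits {row : List Int} {k : Nat} {l : List Nat} {s : List Bool × Bool} {i : Nat}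
    (hmem : i ∈ l) (hE : 0 < row.getD i 0) (hik : i ≠ k) (hilen : i < s.1.length) :
    ((l.foldl (pvRInner row k) s).1).getD i false = true := by
  obtain ⟨l₁, l₂, rfl⟩ := List.append_of_mem hmem
  rw [List.foldl_append, List.foldl_cons]
  apply pvFoldInner_mono
  have hlen2 : (l₁.foldl (pvRInner row k) s).1.length = s.1.length := pvFoldInner_len _ _ _ _
  set s₂ := l₁.foldl (pvRInner row k) s with hs₂
  by_cases hgot : s₂.1.getD i false = true
  · exact pvRInner_mono hgot
  · unfold pvRInner
    rw [if_pos ⟨hE, hik, by simpa using hgot⟩]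
    rw [pvGetD_set, if_pos ⟨rfl, by omega⟩]

theorem pvRound_expand {mr : List (List Int)} {N k : Nat} {seen : List Bool} {j i : Nat}
    (hlen : seen.length = N) (hj : j < N) (hsj : seen.getD j false = true)
    (hE : 0 < ((mr.getD j []).getD i 0)) (hi : i < N) (hik : i ≠ k) :
    ((pvReachRound mr N k seen).1).getD i false = true := by
  unfold pvReachRound
  obtain ⟨l₁, l₂, hdec⟩ := List.append_of_mem (List.mem_range.mpr hj)
  rw [hdec, List.foldl_append, List.foldl_cons]
  apply pvFoldOuter_mono
  set s₁ := l₁.foldl (pvROuter mr N k) (seen, false) with hs₁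
  have hs₁j : s₁.1.getD j false = true := pvFoldOuter_mono hsj
  have hs₁len : s₁.1.length = seen.length := pvFoldOuter_len _ _ _ _ _
  unfold pvROuter
  rw [if_pos hs₁j]
  exact pvFoldInner_hits (List.mem_range.mpr hi) hE hik (by omega)

theorem pvRound_mono {mr : List (List Int)} {N k : Nat} {seen : List Bool} {q : Nat}
    (h : seen.getD q false = true) : ((pvReachRound mr N k seen).1).getD q false = true :=
  pvFoldOuter_mono h

-- the loop with fuel N always ends on a stable round
theorem pvLoop_spec {mr : List (List Int)} {k : Nat} (P : List Bool → Prop)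
    (hP : ∀ s, s.length = mr.length → P s → P ((pvReachRound mr mr.length k s).1)) :
    ∀ (f : Nat) (seen : List Bool), P seen → seen.length = mr.length →
      mr.length ≤ pvCount seen + f →
      P (pvReachLoop mr mr.length k f seen) ∧
      (pvReachLoop mr mr.length k f seen).length = mr.length ∧
      pvReachRound mr mr.length k (pvReachLoop mr mr.length k f seen) =
        (pvReachLoop mr mr.length k f seen, false) := by
  intro f
  induction f with
  | zero =>
    intro seen hPs hlen hcnt
    simp only [pvReachLoop]
    refine ⟨hPs, hlen, ?_⟩
    obtain ⟨hplen, hpc⟩ := pvRound_prog (mr := mr) (N := mr.length) (k := k)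
      (seen := seen) (by omega)
    rcases hpc with ⟨hf, he⟩ | ⟨hf, hlt⟩
    · have : pvReachRound mr mr.length k seen =
        ((pvReachRound mr mr.length k seen).1, (pvReachRound mr mr.length k seen).2) := rfl
      rw [this, hf, he]
    · exfalso
      have h1 := pvCount_le_len (pvReachRound mr mr.length k seen).1
      omega
  | succ f ih =>
    intro seen hPs hlen hcnt
    simp only [pvReachLoop]
    obtain ⟨hplen, hpc⟩ := pvRound_prog (mr := mr) (N := mr.length) (k := k)
      (seen := seen) (by omega)
    rcases hpc with ⟨hf, he⟩ | ⟨hf, hlt⟩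
    · rw [hf]
      simp only [if_false, Bool.false_eq_true]
      rw [he]
      refine ⟨hPs, hlen, ?_⟩
      have : pvReachRound mr mr.length k seen =
        ((pvReachRound mr mr.length k seen).1, (pvReachRound mr mr.length k seen).2) := rfl
      rw [this, hf, he]
    · rw [hf]
      simp only [if_true]
      exact ih _ (hP seen hlen hPs) (by omega) (by omega)

theorem pvFalses_getD (N i : Nat) : (((List.range N).map (fun _ => false)).getD i false) = false := by
  by_cases h : i < N
  · rw [List.getD_eq_getElem?_getD]
    simp [h]
  · rw [List.getD_eq_getElem?_getD, List.getElem?_eq_none (by simpa using h)]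
    rfl

theorem pvReachAvoiding_spec {mr : List (List Int)} {k : Nat} (hk : k < mr.length) (i : Nat) :
    (((pvReachAvoiding mr mr.length k).getD i false = true) ↔ PvReach mr k i) := by
  unfold pvReachAvoiding
  by_cases hk0 : k = 0
  · subst hk0
    rw [if_pos rfl]
    simp only [pvFalses_getD]
    exact ⟨fun h => by simp at h, fun h => absurd h pvNoReach0⟩
  · rw [if_neg hk0]
    have hN : 0 < mr.length := by omega
    set seen0 := (((List.range mr.length).map (fun _ => false)).set 0 true) with hseen0
    have hlen0 : seen0.length = mr.length := by simp [hseen0]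
    have hget0 : seen0.getD 0 false = true := by
      rw [hseen0, pvGetD_set, if_pos ⟨rfl, by simp [hN]⟩]
    have hsound0 : pvSound mr k seen0 := by
      intro q hq
      rw [hseen0, pvGetD_set] at hq
      split_ifs at hq with hq0
      · exact hq0.1 ▸ PvReach.zero hk0 hN
      · rw [pvFalses_getD] at hq; simp at hq
    have hspec := pvLoop_spec (mr := mr) (k := k)
      (fun s => pvSound mr k s ∧ s.getD 0 false = true)
      (fun s hslen ⟨hs1, hs2⟩ => ⟨pvRound_sound hs1, pvRound_mono hs2⟩)
      mr.length seen0 ⟨hsound0, hget0⟩ hlen0 (by omega)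
    obtain ⟨⟨hsound, hget0'⟩, hlenf, hfix⟩ := hspec
    set res := pvReachLoop mr mr.length k mr.length seen0 with hres
    constructor
    · exact fun h => hsound i h
    · intro hr
      induction hr with
      | zero _ _ => exact hget0'
      | step hj hE hilt hine ih =>
        have hjlt : _ < mr.length := pvReach_lt hj
        have := pvRound_expand (mr := mr) (N := mr.length) (k := k) (seen := res)
          hlenf hjlt ih hE hilt hine
        rw [hfix] at this
        exact this

theorem pvGetD_map_range {α : Type} (f : Nat → α) {N i : Nat} (d : α) (h : i < N) :
    (((List.range N).map f).getD i d) = f i := by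
  rw [List.getD_eq_getElem?_getD]
  simp [h]

theorem pvAlt_len (mr : List (List Int)) : (DOM_MATRIX_alt mr).length = mr.length := by
  unfold DOM_MATRIX_alt; simp

theorem pvAlt_val_eq {mr : List (List Int)} {i k : Nat} (hi : i < mr.length)
    (hk : k < mr.length) :
    pvVal (DOM_MATRIX_alt mr) i k =
      (if i = k ∨ ((pvReachAvoiding mr mr.length k).getD i false = false) then (1:Int) else 0) := by
  unfold pvVal DOM_MATRIX_alt
  simp only
  rw [pvGetD_map_range _ _ hi, pvGetD_map_range _ _ hk,
    pvGetD_map_range (fun k => pvReachAvoiding mr mr.length k) _ hk]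

theorem pvAlt_val_one {mr : List (List Int)} {i k : Nat} (hi : i < mr.length)
    (hk : k < mr.length) :
    (pvVal (DOM_MATRIX_alt mr) i k = 1) ↔ (i = k ∨ ¬ PvReach mr k i) := by
  rw [pvAlt_val_eq hi hk]
  have hs := pvReachAvoiding_spec (mr := mr) hk i
  split_ifs with hc
  · simp only [iff_true_intro rfl, true_iff]
    rcases hc with h | h
    · exact Or.inl h
    · exact Or.inr (fun hr => by rw [hs.mpr hr] at h; simp at h)
  · constructor
    · intro h; exact absurd h (by norm_num)
    · intro h
      exfalso
      rcases h with h | h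
      · exact hc (Or.inl h)
      · exact hc (Or.inr (by
          cases hb : (pvReachAvoiding mr mr.length k).getD i false
          · rfl
          · exact absurd (hs.mp hb) h))

theorem pvAlt_val_01 {mr : List (List Int)} {i k : Nat} (hi : i < mr.length)
    (hk : k < mr.length) :
    pvVal (DOM_MATRIX_alt mr) i k = 0 ∨ pvVal (DOM_MATRIX_alt mr) i k = 1 := by
  rw [pvAlt_val_eq hi hk]
  split_ifs <;> simp

-- ===== A-side development =====
def pvProdStepF (mr D : List (List Int)) (i k : Nat) (a : Int) (j : Nat) : Int :=
  if 0 < ((mr.getD j []).getD i 0) then a * pvVal D j k else a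

def pvProd (mr D : List (List Int)) (i k : Nat) : Int :=
  (List.range mr.length).foldl (pvProdStepF mr D i k) 1

theorem pvZipMul_getD {t r : List Int} {k : Nat} (h1 : k < t.length) (h2 : k < r.length) :
    (((t.zip r).map (fun p => p.1 * p.2)).getD k 0) = t.getD k 0 * r.getD k 0 := by
  have hz : k < (t.zip r).length := by simp [List.length_zip]; omega
  have hm : k < ((t.zip r).map (fun p : Int × Int => p.1 * p.2)).length := by simpa using hz
  simp only [List.getD_eq_getElem?_getD, List.getElem?_eq_getElem hm,
    List.getElem?_eq_getElem h1, List.getElem?_eq_getElem h2, List.getElem_map,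
    List.getElem_zip, Option.getD_some]

theorem pvOnesRow_getD {N k : Nat} (h : k < N) : (pvOnesRow N).getD k 0 = 1 := by
  unfold pvOnesRow; rw [pvGetD_map_range _ _ h]

theorem pvOnesRow_len (N : Nat) : (pvOnesRow N).length = N := by unfold pvOnesRow; simp

-- getD-based row access of the matrix rows
theorem pvUpdFold_spec (mr D : List (List Int)) (i : Nat) (hDlen : D.length = mr.length)
    (hrows : ∀ q, q < mr.length → (D.getD q []).length = mr.length) :
    ∀ (l : List Nat), (∀ j ∈ l, j < mr.length) → ∀ (t : List Int), t.length = mr.length →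
      ((l.foldl (fun t j => if 0 < ((mr.getD j []).getD i 0) then
          ((t.zip (D.getD j [])).map (fun p => p.1 * p.2)) else t) t).length = mr.length ∧
       ∀ k, k < mr.length →
         (l.foldl (fun t j => if 0 < ((mr.getD j []).getD i 0) then
            ((t.zip (D.getD j [])).map (fun p => p.1 * p.2)) else t) t).getD k 0 =
          l.foldl (pvProdStepF mr D i k) (t.getD k 0)) := by
  intro l
  induction l with
  | nil => exact fun _ t ht => ⟨ht, fun k _ => rfl⟩
  | cons j l' ih =>
    intro hl t ht
    have hj : j < mr.length := hl j List.mem_cons_self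
    have hrl : (D.getD j []).length = mr.length := hrows j hj
    simp only [List.foldl_cons]
    by_cases hE : 0 < ((mr.getD j []).getD i 0)
    · rw [if_pos hE]
      have ht' : ((t.zip (D.getD j [])).map (fun p => p.1 * p.2)).length = mr.length := by
        rw [List.length_map, List.length_zip, ht, hrl]; simp
      obtain ⟨hlen2, hval2⟩ := ih (fun x hx => hl x (List.mem_cons_of_mem _ hx)) _ ht'
      refine ⟨hlen2, fun k hk => ?_⟩
      rw [hval2 k hk, pvZipMul_getD (by omega) (by omega)]
      simp only [pvProdStepF, if_pos hE]
      rfl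
    · rw [if_neg hE]
      obtain ⟨hlen2, hval2⟩ := ih (fun x hx => hl x (List.mem_cons_of_mem _ hx)) _ ht
      refine ⟨hlen2, fun k hk => ?_⟩
      rw [hval2 k hk]
      simp only [pvProdStepF, if_neg hE]

theorem pvUpdRow_len {mr D : List (List Int)} {i : Nat} (hDlen : D.length = mr.length)
    (hrows : ∀ q, q < mr.length → (D.getD q []).length = mr.length) :
    (pvUpdRow mr mr.length D i).length = mr.length := by
  unfold pvUpdRow
  rw [List.length_set]
  exact (pvUpdFold_spec mr D i hDlen hrows _ (fun j hj => List.mem_range.mp hj) _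
    (pvOnesRow_len _)).1

theorem pvUpdRow_getD {mr D : List (List Int)} {i k : Nat} (hDlen : D.length = mr.length)
    (hrows : ∀ q, q < mr.length → (D.getD q []).length = mr.length) (hk : k < mr.length) :
    (pvUpdRow mr mr.length D i).getD k 0 = if k = i then 1 else pvProd mr D i k := by
  unfold pvUpdRow
  obtain ⟨hlen2, hval2⟩ := pvUpdFold_spec mr D i hDlen hrows _
    (fun j hj => List.mem_range.mp hj) _ (pvOnesRow_len mr.length)
  rw [pvGetD_set, hlen2]
  by_cases he : k = i
  · rw [if_pos ⟨he, he ▸ hk⟩, if_pos he]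
  · rw [if_neg (fun h => he h.1), if_neg he, hval2 k hk, pvOnesRow_getD hk]
    rfl

theorem pvProdF_01 {mr D : List (List Int)} {i k : Nat} {l : List Nat}
    (hl : ∀ j ∈ l, pvVal D j k = 0 ∨ pvVal D j k = 1) :
    ∀ {a : Int}, (a = 0 ∨ a = 1) → (l.foldl (pvProdStepF mr D i k) a = 0 ∨
      l.foldl (pvProdStepF mr D i k) a = 1) := by
  induction l with
  | nil => exact fun h => h
  | cons j t ih =>
    intro a ha
    simp only [List.foldl_cons]
    apply ih (fun x hx => hl x (List.mem_cons_of_mem _ hx))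
    unfold pvProdStepF
    split_ifs
    · rcases ha with h | h <;> rcases hl j List.mem_cons_self with h2 | h2 <;>
        simp [h, h2]
    · exact ha

theorem pvProdF_const1 {mr D : List (List Int)} {i k : Nat} {l : List Nat}
    (hl : ∀ j ∈ l, 0 < ((mr.getD j []).getD i 0) → pvVal D j k = 1) :
    l.foldl (pvProdStepF mr D i k) 1 = 1 := by
  induction l with
  | nil => rfl
  | cons j t ih =>
    simp only [List.foldl_cons]
    have : pvProdStepF mr D i k 1 j = 1 := by
      unfold pvProdStepF
      split_ifs with hE
      · rw [hl j List.mem_cons_self hE]; ring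
      · rfl
    rw [this]
    exact ih (fun x hx => hl x (List.mem_cons_of_mem _ hx))

theorem pvProdF_zero_persist {mr D : List (List Int)} {i k : Nat} (l : List Nat) :
    l.foldl (pvProdStepF mr D i k) 0 = 0 := by
  induction l with
  | nil => rfl
  | cons j t ih =>
    simp only [List.foldl_cons]
    have : pvProdStepF mr D i k 0 j = 0 := by
      unfold pvProdStepF; split_ifs <;> simp
    rw [this, ih]

theorem pvProd_zero {mr D : List (List Int)} {i k j₀ : Nat} (hj : j₀ < mr.length)
    (hE : 0 < ((mr.getD j₀ []).getD i 0)) (hv : pvVal D j₀ k = 0) :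
    pvProd mr D i k = 0 := by
  unfold pvProd
  obtain ⟨l₁, l₂, hdec⟩ := List.append_of_mem (List.mem_range.mpr hj)
  rw [hdec, List.foldl_append, List.foldl_cons]
  have : pvProdStepF mr D i k (l₁.foldl (pvProdStepF mr D i k) 1) j₀ = 0 := by
    unfold pvProdStepF; rw [if_pos hE, hv]; ring
  rw [this, pvProdF_zero_persist]

theorem pvProdF_mono {mr D D' : List (List Int)} {i k : Nat} {l : List Nat}
    (hl : ∀ j ∈ l, (pvVal D j k = 0 ∨ pvVal D j k = 1) ∧ (pvVal D' j k = 0 ∨ pvVal D' j k = 1) ∧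
      pvVal D j k ≤ pvVal D' j k) :
    ∀ {a a' : Int}, 0 ≤ a → 0 ≤ a' → a ≤ a' →
      l.foldl (pvProdStepF mr D i k) a ≤ l.foldl (pvProdStepF mr D' i k) a' := by
  induction l with
  | nil => exact fun _ _ h => h
  | cons j t ih =>
    intro a a' ha ha' hle
    simp only [List.foldl_cons]
    obtain ⟨h1, h2, h3⟩ := hl j List.mem_cons_self
    have hv0 : 0 ≤ pvVal D j k := by rcases h1 with h | h <;> simp [h]
    have hv0' : 0 ≤ pvVal D' j k := by rcases h2 with h | h <;> simp [h]
    apply ih (fun x hx => hl x (List.mem_cons_of_mem _ hx))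
    · unfold pvProdStepF; split_ifs
      · exact mul_nonneg ha hv0
      · exact ha
    · unfold pvProdStepF; split_ifs
      · exact mul_nonneg ha' hv0'
      · exact ha'
    · unfold pvProdStepF; split_ifs
      · exact mul_le_mul hle h3 hv0 ha'
      · exact hle

theorem pvProd_mono {mr D D' : List (List Int)} {i k : Nat}
    (hl : ∀ j, j < mr.length → (pvVal D j k = 0 ∨ pvVal D j k = 1) ∧
      (pvVal D' j k = 0 ∨ pvVal D' j k = 1) ∧ pvVal D j k ≤ pvVal D' j k) :
    pvProd mr D i k ≤ pvProd mr D' i k :=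
  pvProdF_mono (fun j hj => hl j (List.mem_range.mp hj)) (by norm_num) (by norm_num) le_rfl

def pvGood (mr D : List (List Int)) : Prop :=
  D.length = mr.length ∧
  (∀ q, q < mr.length → (D.getD q []).length = mr.length) ∧
  (∀ i k, i < mr.length → k < mr.length → pvVal D i k = 0 ∨ pvVal D i k = 1) ∧
  (0 < mr.length → ∀ k, k < mr.length → pvVal D 0 k = if k = 0 then 1 else 0) ∧
  (∀ i k, i < mr.length → k < mr.length → (i = k ∨ ¬ PvReach mr k i) → pvVal D i k = 1)

def pvLe (mr D D' : List (List Int)) : Prop :=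
  ∀ i k, i < mr.length → k < mr.length → pvVal D i k ≤ pvVal D' i k

theorem pvVal_set {D : List (List Int)} {tmp : List Int} {i q k : Nat} :
    pvVal (D.set i tmp) q k =
      if q = i ∧ i < D.length then tmp.getD k 0 else pvVal D q k := by
  unfold pvVal
  rw [pvGetD_set]
  split_ifs <;> rfl

theorem pvSweepStep_good {mr : List (List Int)} {s : List (List Int) × Bool} {i : Nat}
    (hg : pvGood mr s.1) (hi1 : 1 ≤ i) (hiN : i < mr.length) :
    pvGood mr (pvSweepStep mr mr.length s i).1 := by
  obtain ⟨hlen, hrows, h01, hrow0, hL⟩ := hg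
  unfold pvSweepStep
  simp only
  have htlen : (pvUpdRow mr mr.length s.1 i).length = mr.length := pvUpdRow_len hlen hrows
  have htget : ∀ k, k < mr.length → (pvUpdRow mr mr.length s.1 i).getD k 0 =
      if k = i then 1 else pvProd mr s.1 i k := fun k hk => pvUpdRow_getD hlen hrows hk
  refine ⟨by simp [hlen], ?_, ?_, ?_, ?_⟩
  · intro q hq
    rw [pvGetD_set]
    split_ifs
    · exact htlen
    · exact hrows q hq
  · intro q k hq hk
    rw [pvVal_set]
    split_ifs with hc
    · rw [htget k hk]
      split_ifs with he
      · right; rfl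
      · exact pvProdF_01 (fun j hj => h01 j k (List.mem_range.mp hj) hk) (Or.inr rfl)
    · exact h01 q k hq hk
  · intro hN k hk
    rw [pvVal_set, if_neg (fun h => (by omega : (0:Nat) ≠ i) h.1)]
    exact hrow0 hN k hk
  · intro q k hq hk hqk
    rw [pvVal_set]
    split_ifs with hc
    · obtain ⟨rfl, _⟩ := hc
      rw [htget k hk]
      split_ifs with he
      · rfl
      · rcases hqk with rfl | hnr
        · exact absurd rfl he
        · apply pvProdF_const1
          intro j hj hE
          have hjN : j < mr.length := List.mem_range.mp hj
          apply hL j k hjN hk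
          by_contra hcon
          push_neg at hcon
          obtain ⟨hjk, hrj⟩ := hcon
          exact hnr (PvReach.step hrj hE hiN (fun h => he h.symm))
    · exact hL q k hq hk hqk

theorem pvSweepFold_good {mr : List (List Int)} :
    ∀ (l : List Nat), (∀ x ∈ l, 1 ≤ x ∧ x < mr.length) →
    ∀ (s : List (List Int) × Bool), pvGood mr s.1 →
      pvGood mr ((l.foldl (pvSweepStep mr mr.length) s).1) := by
  intro l
  induction l with
  | nil => exact fun _ s h => h
  | cons x t ih =>
    intro hl s h
    exact ih (fun y hy => hl y (List.mem_cons_of_mem _ hy)) _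
      (pvSweepStep_good h (hl x List.mem_cons_self).1 (hl x List.mem_cons_self).2)

theorem pvSweepFold_untouched {mr : List (List Int)} {N : Nat} {q : Nat} :
    ∀ (l : List Nat), q ∉ l → ∀ (s : List (List Int) × Bool),
      ((l.foldl (pvSweepStep mr N) s).1).getD q [] = s.1.getD q [] := by
  intro l
  induction l with
  | nil => exact fun _ _ => rfl
  | cons x t ih =>
    intro hq s
    rw [List.foldl_cons, ih (fun h => hq (List.mem_cons_of_mem _ h))]
    unfold pvSweepStep
    simp only
    rw [pvGetD_set, if_neg (fun h => hq (by rw [h.1]; exact List.mem_cons_self))]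

theorem pvSweepFold_flagmono {mr : List (List Int)} {N : Nat} :
    ∀ (l : List Nat) (s : List (List Int) × Bool), s.2 = true →
      ((l.foldl (pvSweepStep mr N) s).2) = true := by
  intro l
  induction l with
  | nil => exact fun _ h => h
  | cons x t ih =>
    intro s h
    rw [List.foldl_cons]
    apply ih
    unfold pvSweepStep
    simp only
    split_ifs <;> simp [h]

theorem pvSweepStep_mono {mr : List (List Int)} {s s' : List (List Int) × Bool} {i : Nat}
    (hg : pvGood mr s.1) (hg' : pvGood mr s'.1) (hle : pvLe mr s.1 s'.1)
    (hi1 : 1 ≤ i) (hiN : i < mr.length) :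
    pvLe mr (pvSweepStep mr mr.length s i).1 (pvSweepStep mr mr.length s' i).1 := by
  obtain ⟨hlen, hrows, h01, _, _⟩ := hg
  obtain ⟨hlen', hrows', h01', _, _⟩ := hg'
  intro q k hq hk
  unfold pvSweepStep
  simp only
  rw [pvVal_set, pvVal_set, hlen, hlen']
  by_cases hc : q = i ∧ i < mr.length
  · rw [if_pos hc, if_pos hc, pvUpdRow_getD hlen hrows hk, pvUpdRow_getD hlen' hrows' hk]
    split_ifs
    · exact le_rfl
    · exact pvProd_mono (fun j hj => ⟨h01 j k hj hk, h01' j k hj hk, hle j k hj hk⟩)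
  · rw [if_neg hc, if_neg hc]
    exact hle q k hq hk

theorem pvSweepFold_mono {mr : List (List Int)} :
    ∀ (l : List Nat), (∀ x ∈ l, 1 ≤ x ∧ x < mr.length) →
    ∀ (s s' : List (List Int) × Bool), pvGood mr s.1 → pvGood mr s'.1 → pvLe mr s.1 s'.1 →
      pvLe mr ((l.foldl (pvSweepStep mr mr.length) s).1) ((l.foldl (pvSweepStep mr mr.length) s').1) := by
  intro l
  induction l with
  | nil => exact fun _ _ _ _ _ h => h
  | cons x t ih =>
    intro hl s s' hg hg' hle
    have hx := hl x List.mem_cons_self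
    exact ih (fun y hy => hl y (List.mem_cons_of_mem _ hy)) _ _
      (pvSweepStep_good hg hx.1 hx.2) (pvSweepStep_good hg' hx.1 hx.2)
      (pvSweepStep_mono hg hg' hle hx.1 hx.2)

-- sum of absolute differences is zero iff the lists are equal
theorem pvAbsMapSum_nonneg (l : List Int) : 0 ≤ (l.map (fun x => |x|)).sum := by
  induction l with
  | nil => simp
  | cons a t ih =>
    simp only [List.map_cons, List.sum_cons]
    have := abs_nonneg a
    omega

theorem pvSumAbs_zero {a b : List Int} (h : a.length = b.length) :
    ((((a.zip b).map (fun p => p.1 - p.2)).map (fun x => |x|)).sum = 0) ↔ a = b := by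
  induction a generalizing b with
  | nil =>
    cases b with
    | nil => simp
    | cons y t => simp at h
  | cons x t ih =>
    cases b with
    | nil => simp at h
    | cons y u =>
      simp only [List.zip_cons_cons, List.map_cons, List.sum_cons]
      have habs := abs_nonneg (x - y)
      have hrest := pvAbsMapSum_nonneg ((t.zip u).map (fun p => p.1 - p.2))
      constructor
      · intro hsum
        have h1 : |x - y| = 0 := by omega
        have h2 : x = y := by
          have := abs_eq_zero.mp h1
          omega
        have h3 := (ih (b := u) (by simpa using h)).mp (by omega)
        rw [h2, h3]
      · intro he
        injection he with he1 he2
        subst he1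
        have h3 := (ih (b := u) (by simpa using h)).mpr he2
        rw [h3]
        simp


theorem pvSet_getD_self {D : List (List Int)} {i : Nat} (h : i < D.length) :
    D.set i (D.getD i []) = D := by
  apply List.ext_getElem
  · simp
  · intro n h1 h2
    rw [List.getElem_set]
    split_ifs with he
    · subst he
      exact D.getD_eq_getElem [] h
    · rfl

theorem pvSweepFold_flagfalse {mr : List (List Int)} :
    ∀ (l : List Nat), (∀ x ∈ l, 1 ≤ x ∧ x < mr.length) →
    ∀ (D : List (List Int)) (b : Bool), pvGood mr D →
      ((l.foldl (pvSweepStep mr mr.length) (D, b)).2 = false) →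
      ((l.foldl (pvSweepStep mr mr.length) (D, b)).1 = D ∧ b = false) := by
  intro l
  induction l with
  | nil => exact fun _ D b _ h => ⟨rfl, h⟩
  | cons i t ih =>
    intro hl D b hg hflag
    have hi := hl i List.mem_cons_self
    rw [List.foldl_cons] at hflag ⊢
    -- the step
    have hstep : pvSweepStep mr mr.length (D, b) i =
        (D.set i (pvUpdRow mr mr.length D i),
         if ((((pvUpdRow mr mr.length D i).zip (D.getD i [])).map (fun p => p.1 - p.2)).map
              (fun x => |x|)).sum ≠ 0 then true else b) := rfl
    rw [hstep] at hflag ⊢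
    by_cases hcond : ((((pvUpdRow mr mr.length D i).zip (D.getD i [])).map (fun p => p.1 - p.2)).map
        (fun x => |x|)).sum ≠ 0
    · exfalso
      rw [if_pos hcond] at hflag
      have := pvSweepFold_flagmono (mr := mr) (N := mr.length) t
        (D.set i (pvUpdRow mr mr.length D i), true) rfl
      rw [this] at hflag
      simp at hflag
    · rw [if_neg hcond] at hflag ⊢
      push_neg at hcond
      have hDL : D.length = mr.length := hg.1
      have hrowlen : (D.getD i []).length = mr.length := hg.2.1 i hi.2
      have htmlen : (pvUpdRow mr mr.length D i).length = mr.length := pvUpdRow_len hg.1 hg.2.1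
      have heq : pvUpdRow mr mr.length D i = D.getD i [] :=
        (pvSumAbs_zero (by omega)).mp hcond
      rw [heq, pvSet_getD_self (by omega)] at hflag ⊢
      exact ih (fun y hy => hl y (List.mem_cons_of_mem _ hy)) D b hg hflag

theorem pvSweepFold_self {mr : List (List Int)} :
    ∀ (l : List Nat), (∀ x ∈ l, 1 ≤ x ∧ x < mr.length) → l.Nodup →
    ∀ (D : List (List Int)) (b : Bool), pvGood mr D →
      ((l.foldl (pvSweepStep mr mr.length) (D, b)).1 = D) →
      (∀ i ∈ l, D.getD i [] = pvUpdRow mr mr.length D i) := by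
  intro l
  induction l with
  | nil => intro _ _ D b _ _ i hi; simp at hi
  | cons i t ih =>
    intro hl hnd D b hg hfix
    have hi := hl i List.mem_cons_self
    have hint : i ∉ t := (List.nodup_cons.mp hnd).1
    rw [List.foldl_cons] at hfix
    have hstep : (pvSweepStep mr mr.length (D, b) i).1 =
        D.set i (pvUpdRow mr mr.length D i) := rfl
    -- row i of the final state
    have huntouched := pvSweepFold_untouched (mr := mr) (N := mr.length) (q := i) t hint
      (pvSweepStep mr mr.length (D, b) i)
    have hrowi : (D.set i (pvUpdRow mr mr.length D i)).getD i [] = D.getD i [] := by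
      have : ((t.foldl (pvSweepStep mr mr.length) (pvSweepStep mr mr.length (D, b) i)).1).getD i []
          = D.getD i [] := by rw [hfix]
      rw [huntouched, hstep] at this
      exact this
    have hDL : D.length = mr.length := hg.1
    have hDlen : i < D.length := by omega
    rw [pvGetD_set, if_pos ⟨rfl, hDlen⟩] at hrowi
    have heqrow : D.getD i [] = pvUpdRow mr mr.length D i := hrowi.symm
    have hDset : D.set i (pvUpdRow mr mr.length D i) = D := by
      rw [← heqrow, pvSet_getD_self hDlen]
    intro q hq
    rcases List.mem_cons.mp hq with rfl | hqt
    · exact heqrow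
    · apply ih (fun y hy => hl y (List.mem_cons_of_mem _ hy)) (List.nodup_cons.mp hnd).2 D
        (pvSweepStep mr mr.length (D, b) i).2 hg
      · have : pvSweepStep mr mr.length (D, b) i =
            ((pvSweepStep mr mr.length (D, b) i).1, (pvSweepStep mr mr.length (D, b) i).2) := rfl
        rw [this, hstep, hDset] at hfix
        exact hfix
      · exact hqt

-- extensional equality of the matrices from entry values
theorem pvEq_of_val {mr D D' : List (List Int)} (h1 : D.length = mr.length)
    (h1' : D'.length = mr.length) (h2 : ∀ q, q < mr.length → (D.getD q []).length = mr.length)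
    (h2' : ∀ q, q < mr.length → (D'.getD q []).length = mr.length)
    (hv : ∀ i k, i < mr.length → k < mr.length → pvVal D i k = pvVal D' i k) : D = D' := by
  apply List.ext_getElem (by omega)
  intro i hi hi'
  apply List.ext_getElem
  · have e1 := h2 i (by omega)
    have e2 := h2' i (by omega)
    rw [List.getD_eq_getElem D [] hi] at e1
    rw [List.getD_eq_getElem D' [] hi'] at e2
    omega
  · intro k hk hk'
    have := hv i k (by omega) (by
      have e1 := h2 i (by omega)
      rw [List.getD_eq_getElem D [] hi] at e1
      omega)
    unfold pvVal at this
    rw [List.getD_eq_getElem D [] hi, List.getD_eq_getElem D' [] hi'] at this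
    rw [List.getD_eq_getElem _ 0 hk, List.getD_eq_getElem _ 0 hk'] at this
    exact this

-- counting ones
def pvCountA (mr D : List (List Int)) : Nat :=
  ∑ i ∈ Finset.range mr.length, ∑ k ∈ Finset.range mr.length, (pvVal D i k).toNat

theorem pvCountA_le {mr : List (List Int)} {D : List (List Int)}
    (h01 : ∀ i k, i < mr.length → k < mr.length → pvVal D i k = 0 ∨ pvVal D i k = 1) :
    pvCountA mr D ≤ mr.length * mr.length := by
  unfold pvCountA
  calc ∑ i ∈ Finset.range mr.length, ∑ k ∈ Finset.range mr.length, (pvVal D i k).toNat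
      ≤ ∑ _i ∈ Finset.range mr.length, ∑ _k ∈ Finset.range mr.length, 1 := by
        apply Finset.sum_le_sum
        intro i hi
        apply Finset.sum_le_sum
        intro k hk
        rcases h01 i k (Finset.mem_range.mp hi) (Finset.mem_range.mp hk) with h | h <;> simp [h]
    _ = mr.length * mr.length := by simp [Finset.sum_const, Finset.card_range, Nat.mul_comm]

theorem pvCountA_lt {mr D D' : List (List Int)}
    (h01 : ∀ i k, i < mr.length → k < mr.length → pvVal D i k = 0 ∨ pvVal D i k = 1)
    (h01' : ∀ i k, i < mr.length → k < mr.length → pvVal D' i k = 0 ∨ pvVal D' i k = 1)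
    (hle : pvLe mr D D')
    (hdiff : ∃ i k, i < mr.length ∧ k < mr.length ∧ pvVal D i k ≠ pvVal D' i k) :
    pvCountA mr D < pvCountA mr D' := by
  obtain ⟨i₀, k₀, hi₀, hk₀, hne⟩ := hdiff
  unfold pvCountA
  apply Finset.sum_lt_sum
  · intro i hi
    apply Finset.sum_le_sum
    intro k hk
    have := hle i k (Finset.mem_range.mp hi) (Finset.mem_range.mp hk)
    omega
  · refine ⟨i₀, Finset.mem_range.mpr hi₀, ?_⟩
    apply Finset.sum_lt_sum
    · intro k hk
      have := hle i₀ k hi₀ (Finset.mem_range.mp hk)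
      omega
    · refine ⟨k₀, Finset.mem_range.mpr hk₀, ?_⟩
      have hle0 := hle i₀ k₀ hi₀ hk₀
      rcases h01 i₀ k₀ hi₀ hk₀ with h | h <;> rcases h01' i₀ k₀ hi₀ hk₀ with h' | h'
      · exact absurd (h.trans h'.symm) hne
      · rw [h, h']; norm_num
      · rw [h, h'] at hle0; norm_num at hle0
      · exact absurd (h.trans h'.symm) hne

theorem pvRangeMem {N : Nat} : ∀ x ∈ List.range' 1 (N - 1), 1 ≤ x ∧ x < N := by
  intro x hx; rw [List.mem_range'_1] at hx; omega

theorem pvSweep_good {mr D : List (List Int)} (hg : pvGood mr D) :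
    pvGood mr (pvSweep mr mr.length D).1 :=
  pvSweepFold_good _ pvRangeMem (D, false) hg

def pvInvA (mr D : List (List Int)) : Prop :=
  pvGood mr D ∧ pvLe mr (pvSweep mr mr.length D).1 D

theorem pvSweepFold_noflag {mr : List (List Int)} :
    ∀ (l : List Nat), (∀ x ∈ l, 1 ≤ x ∧ x < mr.length) →
    ∀ (D : List (List Int)), pvGood mr D →
      (∀ i ∈ l, D.getD i [] = pvUpdRow mr mr.length D i) →
      l.foldl (pvSweepStep mr mr.length) (D, false) = (D, false) := by
  intro l
  induction l with
  | nil => exact fun _ _ _ _ => rfl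
  | cons i t ih =>
    intro hl D hg hrows
    have hi := hl i List.mem_cons_self
    have hDL : D.length = mr.length := hg.1
    have heq : pvUpdRow mr mr.length D i = D.getD i [] := (hrows i List.mem_cons_self).symm
    rw [List.foldl_cons]
    have hstep : pvSweepStep mr mr.length (D, false) i = (D, false) := by
      show (D.set i (pvUpdRow mr mr.length D i),
        if ((((pvUpdRow mr mr.length D i).zip (D.getD i [])).map (fun p => p.1 - p.2)).map
          (fun x => |x|)).sum ≠ 0 then true else false) = (D, false)
      rw [heq, pvSet_getD_self (by omega)]
      rw [if_neg (fun h => h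
        ((pvSumAbs_zero (rfl : (D.getD i []).length = (D.getD i []).length)).mpr rfl))]
    rw [hstep]
    exact ih (fun y hy => hl y (List.mem_cons_of_mem _ hy)) D hg
      (fun q hq => hrows q (List.mem_cons_of_mem _ hq))

theorem pvSweep_fixpoint {mr D : List (List Int)} (hg : pvGood mr D)
    (h : (pvSweep mr mr.length D).1 = D) :
    pvSweep mr mr.length D = (D, false) ∧
      (∀ i, 1 ≤ i → i < mr.length → D.getD i [] = pvUpdRow mr mr.length D i) := by
  have hrows := pvSweepFold_self (List.range' 1 (mr.length - 1)) pvRangeMem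
    (List.nodup_range') D false hg h
  have hrows' : ∀ i, 1 ≤ i → i < mr.length → D.getD i [] = pvUpdRow mr mr.length D i := by
    intro i h1 h2
    exact hrows i (List.mem_range'_1.mpr ⟨h1, by omega⟩)
  exact ⟨pvSweepFold_noflag _ pvRangeMem D hg (fun i hi => hrows i hi), hrows'⟩

theorem pvInvA_step {mr D : List (List Int)} (hinv : pvInvA mr D) :
    pvInvA mr (pvSweep mr mr.length D).1 := by
  obtain ⟨hg, hle⟩ := hinv
  refine ⟨pvSweep_good hg, ?_⟩
  exact pvSweepFold_mono _ pvRangeMem _ _ (pvSweep_good hg) hg hle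

theorem pvLoopA_spec {mr : List (List Int)} :
    ∀ (f : Nat) (D : List (List Int)), pvInvA mr D → pvCountA mr D < f →
      pvGood mr (pvLoopA mr mr.length f D) ∧
      pvSweep mr mr.length (pvLoopA mr mr.length f D) = (pvLoopA mr mr.length f D, false) := by
  intro f
  induction f with
  | zero => intro D _ hc; omega
  | succ f ih =>
    intro D hinv hc
    have hred : pvLoopA mr mr.length (f + 1) D =
      if (pvSweep mr mr.length D).2 then pvLoopA mr mr.length f (pvSweep mr mr.length D).1
      else (pvSweep mr mr.length D).1 := rfl
    by_cases hfl : (pvSweep mr mr.length D).2 = true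
    · rw [hred, if_pos hfl]
      have hne : (pvSweep mr mr.length D).1 ≠ D := by
        intro he
        have := (pvSweep_fixpoint hinv.1 he).1
        rw [this] at hfl
        simp at hfl
      have hg' := pvSweep_good hinv.1
      have hdiff : ∃ i k, i < mr.length ∧ k < mr.length ∧
          pvVal (pvSweep mr mr.length D).1 i k ≠ pvVal D i k := by
        by_contra hno
        push_neg at hno
        exact hne (pvEq_of_val hg'.1 hinv.1.1 hg'.2.1 hinv.1.2.1
          (fun i k hi hk => hno i k hi hk))
      have hcnt := pvCountA_lt hg'.2.2.1 hinv.1.2.2.1 hinv.2 hdiff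
      exact ih _ (pvInvA_step hinv) (by omega)
    · simp only [Bool.not_eq_true] at hfl
      have hff := pvSweepFold_flagfalse _ pvRangeMem D false hinv.1 hfl
      have h1 : (pvSweep mr mr.length D).1 = D := hff.1
      rw [hred, if_neg (by simp [hfl]), h1]
      refine ⟨hinv.1, ?_⟩
      have hpair : pvSweep mr mr.length D =
        ((pvSweep mr mr.length D).1, (pvSweep mr mr.length D).2) := rfl
      rw [hpair, h1, hfl]

-- initial matrix: all ones, then first row zeroed outside column 0
theorem pvRow0Fold :
    ∀ (l : List Nat) (D : List (List Int)),
      ((l.foldl (fun D i => D.set 0 ((D.getD 0 []).set i 0)) D).length = D.length) ∧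
      (∀ q, 1 ≤ q →
        (l.foldl (fun D i => D.set 0 ((D.getD 0 []).set i 0)) D).getD q [] = D.getD q []) ∧
      (((l.foldl (fun D i => D.set 0 ((D.getD 0 []).set i 0)) D).getD 0 []).length =
        (D.getD 0 []).length) ∧
      (∀ k, ((l.foldl (fun D i => D.set 0 ((D.getD 0 []).set i 0)) D).getD 0 []).getD k 0 =
        if k ∈ l ∧ k < (D.getD 0 []).length ∧ 0 < D.length then 0
        else (D.getD 0 []).getD k 0) := by
  intro l
  induction l with
  | nil =>
    intro D
    refine ⟨rfl, fun _ _ => rfl, rfl, fun k => ?_⟩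
    rw [if_neg (by simp)]
    rfl
  | cons x t ih =>
    intro D
    set D₁ := D.set 0 ((D.getD 0 []).set x 0) with hD₁
    have hlen1 : D₁.length = D.length := by simp [hD₁]
    have hq1 : ∀ q, 1 ≤ q → D₁.getD q [] = D.getD q [] := by
      intro q hq
      rw [hD₁, pvGetD_set, if_neg (fun h => by omega)]
    have hrow0 : D₁.getD 0 [] =
        if 0 < D.length then (D.getD 0 []).set x 0 else D.getD 0 [] := by
      rw [hD₁, pvGetD_set]
      split_ifs with h1 h2 h2
      · rfl
      · exact absurd h1.2 h2
      · exact absurd ⟨rfl, h2⟩ h1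
      · rfl
    obtain ⟨ih1, ih2, ih3, ih4⟩ := ih D₁
    simp only [List.foldl_cons]
    refine ⟨by rw [ih1, hlen1], fun q hq => by rw [ih2 q hq, hq1 q hq], ?_, ?_⟩
    · rw [ih3, hrow0]
      split_ifs <;> simp
    · intro k
      rw [ih4 k]
      by_cases hD : 0 < D.length
      · rw [hrow0, if_pos hD]
        have hlr : ((D.getD 0 []).set x 0).length = (D.getD 0 []).length := by simp
        by_cases hkt : k ∈ t
        · by_cases hkl : k < (D.getD 0 []).length
          · rw [if_pos ⟨hkt, by omega⟩, if_pos ⟨List.mem_cons_of_mem _ hkt, hkl, hD⟩]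
          · rw [if_neg (by rw [hlen1, hlr]; exact fun h => hkl h.2.1),
              if_neg (fun h => hkl h.2.1), pvGetD_set, if_neg (fun h => hkl (by omega))]
        · rw [if_neg (by rw [hlen1, hlr]; exact fun h => hkt h.1), pvGetD_set]
          by_cases hkx : k = x
          · subst hkx
            by_cases hkl : k < (D.getD 0 []).length
            · rw [if_pos ⟨rfl, hkl⟩, if_pos ⟨List.mem_cons_self, hkl, hD⟩]
            · rw [if_neg (fun h => hkl h.2), if_neg (fun h => hkl h.2.1)]
          · rw [if_neg (fun h => hkx h.1),
              if_neg (fun h => (List.mem_cons.mp h.1).elim hkx hkt)]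
      · have hD0 : D.length = 0 := by omega
        have : D₁ = D := by
          rw [hD₁]
          cases D
          · rfl
          · simp at hD0
        rw [this]
        rw [if_neg (fun h => hD h.2.2), if_neg (fun h => hD h.2.2)]

def pvDM0 (mr : List (List Int)) : List (List Int) :=
  (List.range mr.length).map (fun _ => (List.range mr.length).map (fun _ => (1:Int)))

def pvDM1 (mr : List (List Int)) : List (List Int) :=
  (List.range' 1 (mr.length - 1)).foldl
    (fun D i => D.set 0 ((D.getD 0 []).set i 0)) (pvDM0 mr)

theorem pvDM0_len (mr : List (List Int)) : (pvDM0 mr).length = mr.length := by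
  unfold pvDM0; simp

theorem pvDM0_row {mr : List (List Int)} {q : Nat} (hq : q < mr.length) :
    (pvDM0 mr).getD q [] = (List.range mr.length).map (fun _ => (1:Int)) := by
  unfold pvDM0; rw [pvGetD_map_range _ _ hq]

theorem pvDM0_rowlen {mr : List (List Int)} {q : Nat} (hq : q < mr.length) :
    ((pvDM0 mr).getD q []).length = mr.length := by
  rw [pvDM0_row hq]; simp

theorem pvDM0_val {mr : List (List Int)} {q k : Nat} (hq : q < mr.length)
    (hk : k < mr.length) : pvVal (pvDM0 mr) q k = 1 := by
  unfold pvVal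
  rw [pvDM0_row hq, pvGetD_map_range _ _ hk]

theorem pvDM1_len (mr : List (List Int)) : (pvDM1 mr).length = mr.length := by
  unfold pvDM1
  rw [(pvRow0Fold _ (pvDM0 mr)).1, pvDM0_len]

theorem pvDM1_rowlen {mr : List (List Int)} {q : Nat} (hq : q < mr.length) :
    ((pvDM1 mr).getD q []).length = mr.length := by
  unfold pvDM1
  obtain ⟨_, h2, h3, _⟩ := pvRow0Fold (List.range' 1 (mr.length - 1)) (pvDM0 mr)
  cases Nat.eq_zero_or_pos q with
  | inl h0 => subst h0; rw [h3, pvDM0_rowlen hq]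
  | inr h1 => rw [h2 q h1, pvDM0_rowlen hq]

theorem pvDM1_val_hi {mr : List (List Int)} {q k : Nat} (hq1 : 1 ≤ q) (hq : q < mr.length)
    (hk : k < mr.length) : pvVal (pvDM1 mr) q k = 1 := by
  unfold pvVal pvDM1
  rw [(pvRow0Fold _ (pvDM0 mr)).2.1 q hq1]
  exact pvDM0_val hq hk

theorem pvDM1_val_row0 {mr : List (List Int)} {k : Nat} (hN : 0 < mr.length)
    (hk : k < mr.length) : pvVal (pvDM1 mr) 0 k = if k = 0 then 1 else 0 := by
  unfold pvVal pvDM1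
  rw [(pvRow0Fold _ (pvDM0 mr)).2.2.2 k]
  by_cases hk0 : k = 0
  · rw [if_neg (fun h => by
      have := (List.mem_range'_1.mp h.1).1
      omega), if_pos hk0]
    subst hk0
    exact pvDM0_val hN hk
  · rw [if_pos ⟨List.mem_range'_1.mpr ⟨by omega, by omega⟩,
      by rw [pvDM0_rowlen hN]; omega, by rw [pvDM0_len]; omega⟩, if_neg hk0]

theorem pvDM1_good (mr : List (List Int)) : pvGood mr (pvDM1 mr) := by
  refine ⟨pvDM1_len mr, fun q hq => pvDM1_rowlen hq, ?_, ?_, ?_⟩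
  · intro i k hi hk
    cases Nat.eq_zero_or_pos i with
    | inl h0 =>
      subst h0
      rw [pvDM1_val_row0 (by omega) hk]
      split_ifs <;> simp
    | inr h1 => right; exact pvDM1_val_hi h1 hi hk
  · intro hN k hk
    exact pvDM1_val_row0 hN hk
  · intro i k hi hk hik
    cases Nat.eq_zero_or_pos i with
    | inl h0 =>
      subst h0
      rw [pvDM1_val_row0 (by omega) hk]
      by_cases hk0 : k = 0
      · rw [if_pos hk0]
      · exfalso
        rcases hik with h | hnr
        · exact hk0 h.symm
        · exact hnr (PvReach.zero hk0 (by omega))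
    | inr h1 => exact pvDM1_val_hi h1 hi hk

theorem pvDM1_inv (mr : List (List Int)) : pvInvA mr (pvDM1 mr) := by
  refine ⟨pvDM1_good mr, ?_⟩
  intro i k hi hk
  cases Nat.eq_zero_or_pos i with
  | inl h0 =>
    subst h0
    have huntouched : ((pvSweep mr mr.length (pvDM1 mr)).1).getD 0 [] =
        (pvDM1 mr).getD 0 [] :=
      pvSweepFold_untouched _ (fun h => absurd (pvRangeMem 0 h).1 (by omega)) _
    unfold pvVal
    rw [huntouched]
  | inr h1 =>
    rcases (pvSweep_good (pvDM1_good mr)).2.2.1 i k hi hk with h | h <;> rw [h] <;>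
      rw [pvDM1_val_hi h1 hi hk]
    · norm_num

-- at the fixpoint, reachable-avoiding-k entries are zero
theorem pvFixed_reach_zero {mr D : List (List Int)} (hg : pvGood mr D)
    (hfix : ∀ i, 1 ≤ i → i < mr.length → D.getD i [] = pvUpdRow mr mr.length D i) :
    ∀ k i, k < mr.length → PvReach mr k i → pvVal D i k = 0 := by
  intro k i hk hr
  induction hr with
  | zero hk0 hN =>
    rw [hg.2.2.2.1 hN k hk, if_neg (fun h => hk0 h)]
  | step hj hE hiN hik ih =>
    rename_i j i
    cases Nat.eq_zero_or_pos i with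
    | inl h0 =>
      subst h0
      rw [hg.2.2.2.1 (by omega) k hk, if_neg (fun h => pvReach_kne hj h)]
    | inr h1 =>
      have : pvVal D i k = (pvUpdRow mr mr.length D i).getD k 0 := by
        unfold pvVal
        rw [hfix i h1 hiN]
      rw [this, pvUpdRow_getD hg.1 hg.2.1 hk, if_neg (fun h => hik h.symm)]
      exact pvProd_zero (pvReach_lt hj) hE ih

-- full characterisation of port A's result
theorem pvA_char (mr : List (List Int)) :
    pvGood mr (DOM_MATRIX mr) ∧
    (∀ i k, i < mr.length → k < mr.length →
      (pvVal (DOM_MATRIX mr) i k = 1 ↔ (i = k ∨ ¬ PvReach mr k i))) := by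
  have hD : DOM_MATRIX mr =
      pvLoopA mr mr.length (mr.length * mr.length + 2) (pvDM1 mr) := rfl
  have hcnt : pvCountA mr (pvDM1 mr) < mr.length * mr.length + 2 := by
    have := pvCountA_le (pvDM1_good mr).2.2.1
    omega
  obtain ⟨hgood, hfixp⟩ := pvLoopA_spec (mr.length * mr.length + 2) (pvDM1 mr)
    (pvDM1_inv mr) hcnt
  rw [← hD] at hgood hfixp
  have hfixrows := (pvSweep_fixpoint hgood (by rw [hfixp])).2
  refine ⟨hgood, fun i k hi hk => ?_⟩
  constructor
  · intro h1
    by_contra hcon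
    push_neg at hcon
    obtain ⟨hik, hre⟩ := hcon
    have := pvFixed_reach_zero hgood hfixrows k i hk hre
    rw [h1] at this
    norm_num at this
  · exact fun h => hgood.2.2.2.2 i k hi hk h

-- the two ports agree
theorem pvAB_eq (mr : List (List Int)) : DOM_MATRIX mr = DOM_MATRIX_alt mr := by
  obtain ⟨hgood, hchar⟩ := pvA_char mr
  apply pvEq_of_val hgood.1 (pvAlt_len mr) hgood.2.1
    (fun q hq => by
      unfold DOM_MATRIX_alt
      simp only
      rw [pvGetD_map_range _ _ hq]
      simp)
  intro i k hi hk
  have ha01 := hgood.2.2.1 i k hi hk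
  have hb01 := pvAlt_val_01 (mr := mr) hi hk
  have hiffa := hchar i k hi hk
  have hiffb := pvAlt_val_one (mr := mr) hi hk
  rcases ha01 with ha | ha <;> rcases hb01 with hb | hb
  · rw [ha, hb]
  · exfalso
    have := hiffa.mpr (hiffb.mp hb)
    rw [ha] at this
    norm_num at this
  · exfalso
    have := hiffb.mpr (hiffa.mp ha)
    rw [hb] at this
    norm_num at this
  · rw [ha, hb]

-- ===== VERDICT (by name: the statement is the Claim_ definition above) =====
theorem DOM_MATRIX_spec : Claim_equal_DOM_MATRIX := by
  intro matrix_root _ _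
  unfold Spec_DOM_MATRIX
  exact pvAB_eq matrix_root
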